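-- pv_equiv track=rewrite | github.com/indrajeetadityaroy9/lexical-sae | splade_classifier/faithfulness.py | _keep_only_tokens
-- ===== SOURCE A (Python) =====
-- def _keep_only_tokens(text: str, tokens_to_keep: set[str], mask_token: str) -> str:
--     """Keep only specified tokens, mask everything else."""
--     words = text.split()
--     masked_words = []
--     for word in words:
--         word_lower = word.lower().strip('.,!?;:"\'-')
--         if word_lower in tokens_to_keep or any(t in word_lower for t in tokens_to_keep):
--             masked_words.append(word)
--         else:
--             masked_words.append(mask_token)
--     return ' '.join(masked_words)
-- ===== SOURCE B (Python) =====
-- def _keep_only_tokens(text: str, tokens_to_keep: set[str], mask_token: str) -> str: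
--     """Keep only specified tokens, mask everything else: a word is kept iff some
--     window of its normalized form whose length is a token length is itself in the
--     token set (set lookups over windows, instead of a substring search per token)."""
--     lengths = {len(t) for t in tokens_to_keep}
--     masked_words = []
--     for word in text.split():
--         w = word.lower().strip('.,!?;:"\'-')
--         n = len(w)
--         keep = any(w[i:i + L] in tokens_to_keep
--                    for L in lengths for i in range(n - L + 1))
--         masked_words.append(word if keep else mask_token)
--     return ' '.join(masked_words)
-- ===== Notes on version B (the rewrite author's own statement) =====
-- stated objective: alternative
-- what changed: Instead of scanning the whole token set per word and running a substring search for each token, B computes the set of token lengths once and slides windows of exactly those lengths over each normalized word, testing each window by a set lookup, so the per-word cost depends on the number of distinct token lengths rather than the number of tokens.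
import Mathlib
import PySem

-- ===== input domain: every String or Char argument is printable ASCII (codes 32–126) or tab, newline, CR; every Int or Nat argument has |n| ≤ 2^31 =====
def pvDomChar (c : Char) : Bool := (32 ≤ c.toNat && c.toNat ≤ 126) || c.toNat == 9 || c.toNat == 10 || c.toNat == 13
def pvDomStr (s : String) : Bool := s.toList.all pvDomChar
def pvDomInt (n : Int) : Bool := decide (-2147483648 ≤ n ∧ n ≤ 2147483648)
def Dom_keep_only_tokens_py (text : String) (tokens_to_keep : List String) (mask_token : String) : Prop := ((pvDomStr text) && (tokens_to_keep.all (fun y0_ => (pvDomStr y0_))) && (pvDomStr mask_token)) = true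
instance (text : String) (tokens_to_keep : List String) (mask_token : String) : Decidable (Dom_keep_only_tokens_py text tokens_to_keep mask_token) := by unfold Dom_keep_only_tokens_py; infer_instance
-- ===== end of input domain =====

-- B replaces A's per-word scan over the token set (a substring search per token) by a
-- per-word enumeration of the normalized word's substrings, each looked up in the token
-- set; same return value, different traversal (alternative decomposition).

-- ===== PORT A =====
def keep_only_tokens_py (text : String) (tokens_to_keep : List String) (mask_token : String) : String :=
  let words := PySem.Str.split₀ text
  let masked_words : List String := words.foldl (fun acc word =>
    let word_lower := PySem.Str.stripChars (PySem.Str.lower word) ".,!?;:\"'-"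
    if PySem.Set.contains tokens_to_keep word_lower
        || tokens_to_keep.any (fun t => PySem.Str.isIn t word_lower)
    then acc ++ [word]
    else acc ++ [mask_token]) []
  PySem.Str.join " " masked_words

-- ===== PORT B =====
-- 'any(w[i:i+L] in tokens_to_keep for L in lengths for i in range(n - L + 1))'
def pvHasKeptSub (tokens_to_keep : List String) (w : String) : Bool :=
  let lengths : PySem.Set Int := PySem.Set.ofList (tokens_to_keep.map PySem.Str.len)
  let n := PySem.Str.len w
  lengths.any (fun L =>
    (PySem.List.pyRange 0 (n - L + 1)).any (fun i =>
      PySem.Set.contains tokens_to_keep (PySem.Str.slice w (some i) (some (i + L)))))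

def keep_only_tokens_py_alt (text : String) (tokens_to_keep : List String) (mask_token : String) : String :=
  PySem.Str.join " " ((PySem.Str.split₀ text).map (fun word =>
    let w := PySem.Str.stripChars (PySem.Str.lower word) ".,!?;:\"'-"
    if pvHasKeptSub tokens_to_keep w then word else mask_token))

-- ===== PRECONDITION & SPEC =====
def Spec_keep_only_tokens_py (text : String) (tokens_to_keep : List String) (mask_token : String) (out : String) : Prop := out = keep_only_tokens_py_alt text tokens_to_keep mask_token
instance (text : String) (tokens_to_keep : List String) (mask_token : String) (out : String) : Decidable (Spec_keep_only_tokens_py text tokens_to_keep mask_token out) := by unfold Spec_keep_only_tokens_py; infer_instance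

-- ===== CLAIM (what is proved, stated in full; the proofs are below) =====
def Claim_equal_keep_only_tokens_py : Prop := ∀ (text : String) (tokens_to_keep : List String) (mask_token : String), Dom_keep_only_tokens_py text tokens_to_keep mask_token → Spec_keep_only_tokens_py text tokens_to_keep mask_token (keep_only_tokens_py text tokens_to_keep mask_token)

-- ===== LEMMAS AND PROOFS =====

-- Per-word condition: A's "w ∈ toks or some token is a substring of w" equals
-- B's "some substring w[i:j] of w is in toks".
theorem pv_cond_eq (toks : List String) (w : String) :
    (PySem.Set.contains toks w || toks.any (fun t => PySem.Str.isIn t w))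
      = pvHasKeptSub toks w := by
  rw [Bool.eq_iff_iff]
  simp only [pvHasKeptSub, List.any_eq_true, Bool.or_eq_true, PySem.Set.contains_iff,
    PySem.Str.isIn_iff_infix, PySem.List.mem_pyRange_one, PySem.Str.len_eq,
    PySem.Set.mem_ofList, List.mem_map]
  constructor
  · rintro (hw | ⟨t, ht, hinf⟩)
    · -- w itself is a token: the window of length len(w) at position 0 is w
      refine ⟨(w.toList.length : Int), ⟨w, hw, rfl⟩,
              0, ⟨by omega, by omega⟩, ?_⟩
      have h0 : PySem.Str.slice w (some 0) (some (0 + (w.toList.length : Int))) = w := by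
        apply String.toList_inj.mp
        simp [PySem.Str.toList_slice]
      rwa [h0]
    · -- some token t is a substring of w
      obtain ⟨s₁, s₂, hsplit⟩ := hinf
      have hlen : s₁.length + t.toList.length + s₂.length = w.toList.length := by
        rw [← hsplit]; simp; omega
      refine ⟨(t.toList.length : Int), ⟨t, ht, rfl⟩,
              (s₁.length : Int), ⟨by omega, by omega⟩, ?_⟩
      have hslice : PySem.Str.slice w (some (s₁.length : Int))
          (some ((s₁.length : Int) + (t.toList.length : Int))) = t := by
        apply String.toList_inj.mp
        have hcast : (s₁.length : Int) + (t.toList.length : Int)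
            = ((s₁.length + t.toList.length : Nat) : Int) := by push_cast; omega
        rw [hcast]
        simp only [PySem.Str.toList_slice, PySem.Chars.slice_eq_listSlice,
          PySem.List.slice_natCast]
        rw [← hsplit]
        simp
      rwa [hslice]
  · rintro ⟨L, ⟨t, _, htL⟩, i, ⟨hi0, _⟩, hmem⟩
    right
    refine ⟨PySem.Str.slice w (some i) (some (i + L)), hmem, ?_⟩
    have hL0 : 0 ≤ L := by omega
    have hi : i = ((i.toNat : Nat) : Int) := by omega
    have hiL : i + L = (((i.toNat + L.toNat : Nat)) : Int) := by push_cast; omega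
    rw [hiL, hi]
    simp only [PySem.Str.toList_slice, PySem.Chars.slice_eq_listSlice,
      PySem.List.slice_natCast]
    exact (List.take_prefix _ _).isInfix.trans (List.drop_suffix _ _).isInfix

-- ===== VERDICT (by name: the statement is the Claim_ definition above) =====
theorem keep_only_tokens_py_spec : Claim_equal_keep_only_tokens_py := by
  intro text toks mask _
  unfold Spec_keep_only_tokens_py keep_only_tokens_py keep_only_tokens_py_alt
  dsimp only
  congr 1
  rw [PySem.List.foldl_congr_mem _ _
    (fun acc word => acc ++ [if pvHasKeptSub toks
        (PySem.Str.stripChars (PySem.Str.lower word) ".,!?;:\"'-") then word else mask]) _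
    (by
      intro acc word _
      simp only [pv_cond_eq]
      split <;> rfl)]
  rw [PySem.List.foldl_append_singleton_eq_map]
  simp
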